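-- pv_equiv track=rewrite | github.com/aiTemUwU/TemtemComProg | 08_Dict_★★★_Cash.py | pay
-- ===== SOURCE A (Python) =====
-- def total(pocket):
-- 	totCash = 0
-- 	for e in pocket.keys():
-- 		totCash += pocket.get(e)*e
--
-- 	return totCash
--
-- def take(pocket, money):
-- 	for e in money.keys():
-- 		if e in pocket.keys():
-- 			pocket.update({e:pocket.get(e)+money.get(e)})
-- 		else: pocket.update({e:money.get(e)})
-- 	return
--
-- def pay(pocket, amt):
--
-- 	if amt > total(pocket): return {}
-- 	else: pass
--
-- 	paidDict = {}
-- 	for value in sorted(pocket.keys(), reverse = True):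
--
-- 		if amt >= value:
-- 			paidN = min(pocket.get(value), amt // value)
--
-- 			paidDict.update({value:paidN})
-- 			pocket.update({value:pocket.get(value)-paidN})
-- 			amt -= value * paidN
-- 		else: pass
--
-- 	if amt != 0:
-- 		take(pocket, paidDict)
-- 		return {}
-- 	else: return paidDict
-- ===== SOURCE B (Python) =====
-- def pay(pocket, amt):
--     if amt > sum(v * n for v, n in pocket.items()):
--         return {}
--     keys = list(pocket)
--     plan = []
--     while True:
--         elig = [k for k in keys if k <= amt]
--         if not elig:
--             break
--         m = max(elig)
--         n = min(pocket[m], amt // m)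
--         plan.append((m, n))
--         amt -= m * n
--         keys = [k for k in keys if k < m]
--     if amt != 0:
--         return {}
--     for v, n in plan:
--         pocket[v] -= n
--     return dict(plan)
-- ===== Notes on version B (the rewrite author's own statement) =====
-- stated objective: alternative
-- what changed: B never sorts and never rolls back: instead of A's sort-descending sweep over the pocket with mutate-then-undo via take(), B repeatedly selects the maximum eligible denomination (max key <= remaining amt) from a shrinking candidate set, records the plan in a separate list, and applies it to the pocket only on success.
import Mathlib
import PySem

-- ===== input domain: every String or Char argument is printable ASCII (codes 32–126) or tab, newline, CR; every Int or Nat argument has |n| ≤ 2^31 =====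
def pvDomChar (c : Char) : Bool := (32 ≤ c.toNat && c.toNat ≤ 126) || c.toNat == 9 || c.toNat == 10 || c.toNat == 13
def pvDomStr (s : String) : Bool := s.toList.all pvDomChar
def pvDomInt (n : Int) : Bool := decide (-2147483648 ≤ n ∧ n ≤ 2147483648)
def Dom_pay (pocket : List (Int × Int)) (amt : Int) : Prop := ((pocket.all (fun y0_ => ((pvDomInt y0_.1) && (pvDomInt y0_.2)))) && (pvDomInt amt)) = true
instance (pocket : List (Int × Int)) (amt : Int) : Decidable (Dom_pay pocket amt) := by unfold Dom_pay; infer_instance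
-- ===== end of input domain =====

-- B replaces A's sort-descending sweep with mutate-then-rollback (the `take` helper) by a
-- max-selection loop over a shrinking candidate set: no sort, no pocket mutation until success.
-- Both A and B mutate the pocket dict in place on the success path identically; the equivalence
-- proved here is about the RETURN value.

-- ===== PORT A =====
-- A's helper `total(pocket)`: iterates over the keys and looks each value up.
def payTotal (d : PySem.Dict Int Int) : Int :=
  d.keys.foldl (fun totCash e => totCash + d.getD e 0 * e) 0

-- A's loop body: state = (paidDict, pocket, amt); mutates pocket as it goes.
def payStep (st : PySem.Dict Int Int × PySem.Dict Int Int × Int) (value : Int) :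
    PySem.Dict Int Int × PySem.Dict Int Int × Int :=
  if st.2.2 ≥ value then
    let paidN := min (st.2.1.getD value 0) (PySem.Int.floordiv st.2.2 value)
    (st.1.insert value paidN, st.2.1.insert value (st.2.1.getD value 0 - paidN),
     st.2.2 - value * paidN)
  else st

-- A's `take(pocket, paidDict)` only mutates the pocket argument and returns None, so it does not
-- affect the returned value; the failure branch returns {} as A does.
def pay (pocket : List (Int × Int)) (amt : Int) : List (Int × Int) :=
  let d := PySem.Dict.mk pocket
  if amt > payTotal d then []
  else
    let st := (PySem.List.sorted d.keys (fun k => k) true).foldl payStep (PySem.Dict.empty, d, amt)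
    if st.2.2 ≠ 0 then [] else st.1.items

-- ===== PORT B =====
-- B's `while True` selection loop: state = (remaining candidate keys, remaining amt, plan);
-- each round picks the MAX eligible key (≤ amt), pays with it, and keeps only keys below it.
def payPlan (d : PySem.Dict Int Int) (keys : List Int) (amt : Int) (plan : List (Int × Int)) :
    List (Int × Int) × Int :=
  match h : (keys.filter (fun k => k ≤ amt)).max? with
  | none => (plan, amt)
  | some m =>
    let n := min (d.getD m 0) (PySem.Int.floordiv amt m)
    payPlan d (keys.filter (fun k => k < m)) (amt - m * n) (plan ++ [(m, n)])
termination_by keys.length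
decreasing_by
  have hm : m ∈ keys.filter (fun k => decide (k ≤ amt)) :=
    (List.max?_eq_some_iff.mp h).1
  have hmk : m ∈ keys := (List.mem_filter.mp hm).1
  rw [List.length_unattach, ← List.length_attach (l := keys)]
  apply List.length_filter_lt_length_iff_exists.mpr
  exact ⟨⟨m, hmk⟩, List.mem_attach _ _, by simp⟩

def pay_alt (pocket : List (Int × Int)) (amt : Int) : List (Int × Int) :=
  let d := PySem.Dict.mk pocket
  if amt > (d.items.map (fun p => p.1 * p.2)).sum then []
  else
    let st := payPlan d d.keys amt []
    if st.2 ≠ 0 then [] else st.1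
    -- (on success the Python B also applies the plan to pocket — a side effect, not the return value)

-- ===== PRECONDITION & SPEC =====
-- Pre_ excludes (a) assoc lists with duplicate keys, which represent no Python dict, and
-- (b) exactly the inputs where both A and B raise ZeroDivisionError: denomination 0 present
-- while 0 ≤ amt ≤ total.
def Pre_pay (pocket : List (Int × Int)) (amt : Int) : Prop :=
  (pocket.map Prod.fst).Nodup ∧
  ¬((0 : Int) ∈ pocket.map Prod.fst ∧ 0 ≤ amt ∧ amt ≤ (pocket.map (fun p => p.1 * p.2)).sum)
instance (pocket : List (Int × Int)) (amt : Int) : Decidable (Pre_pay pocket amt) := by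
  unfold Pre_pay; infer_instance

def pvWitness_pay : (List (Int × Int)) × Int := ([(5, 3), (1, 10)], 8)

def Spec_pay (pocket : List (Int × Int)) (amt : Int) (out : List (Int × Int)) : Prop := out = pay_alt pocket amt
instance (pocket : List (Int × Int)) (amt : Int) (out : List (Int × Int)) : Decidable (Spec_pay pocket amt out) := by unfold Spec_pay; infer_instance

-- ===== CLAIM (what is proved, stated in full; the proofs are below) =====
def Claim_equal_pay : Prop := ∀ (pocket : List (Int × Int)) (amt : Int), Dom_pay pocket amt → Pre_pay pocket amt → Spec_pay pocket amt (pay pocket amt)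

-- ===== LEMMAS AND PROOFS =====

-- A's total over keys-with-lookup equals B's sum over items, given unique keys.
lemma payTotal_aux (pocket : List (Int × Int)) (acc : Int)
    (h : (pocket.map Prod.fst).Nodup) :
    (pocket.map Prod.fst).foldl
      (fun totCash e => totCash + (PySem.Dict.mk pocket).getD e 0 * e) acc
      = acc + (pocket.map (fun p => p.1 * p.2)).sum := by
  induction pocket generalizing acc with
  | nil => simp
  | cons p rest ih =>
    obtain ⟨k, v⟩ := p
    simp only [List.map_cons, List.nodup_cons] at h ⊢
    rw [List.foldl_cons]
    have hk : (PySem.Dict.mk ((k, v) :: rest)).getD k 0 = v := by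
      simp [PySem.Dict.getD_eq_get?_getD, PySem.Dict.get?_mk_cons]
    rw [hk]
    have hcongr : (rest.map Prod.fst).foldl
        (fun totCash e => totCash + (PySem.Dict.mk ((k, v) :: rest)).getD e 0 * e) (acc + v * k)
        = (rest.map Prod.fst).foldl
        (fun totCash e => totCash + (PySem.Dict.mk rest).getD e 0 * e) (acc + v * k) := by
      apply PySem.List.foldl_congr_mem
      intro a x hx
      have hne : k ≠ x := fun hkx => h.1 (hkx ▸ hx)
      simp [PySem.Dict.getD_eq_get?_getD, PySem.Dict.get?_mk_cons, hne]
    rw [hcongr, ih _ h.2, List.sum_cons]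
    ring

lemma payTotal_eq (pocket : List (Int × Int)) (h : (pocket.map Prod.fst).Nodup) :
    payTotal (PySem.Dict.mk pocket)
      = (pocket.map (fun p => p.1 * p.2)).sum := by
  have hk : (PySem.Dict.mk pocket).keys = pocket.map Prod.fst := rfl
  unfold payTotal
  rw [hk, payTotal_aux pocket 0 h]
  ring

-- Proof-side intermediate: A's loop with the pocket mutation stripped out, keeping the plan
-- as a plain list; bridges A's payStep fold to B's payPlan recursion.
def planStep (d : PySem.Dict Int Int) (st : List (Int × Int) × Int) (value : Int) :
    List (Int × Int) × Int :=
  if st.2 ≥ value then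
    let n := min (d.getD value 0) (PySem.Int.floordiv st.2 value)
    (st.1 ++ [(value, n)], st.2 - value * n)
  else st

-- A's fold stays in lock-step with the plain-plan fold: paidDict.items is the plan list and
-- the remaining amounts coincide, as long as the keys still to be visited are fresh in paidDict
-- and untouched in A's mutated pocket.
lemma loop_eq (d : PySem.Dict Int Int) (L : List Int)
    (pd pk : PySem.Dict Int Int) (a : Int)
    (hnd : L.Nodup)
    (hpk : ∀ v ∈ L, pk.getD v 0 = d.getD v 0)
    (hpd : ∀ v ∈ L, pd.contains v = false) :
    (L.foldl payStep (pd, pk, a)).1.items = (L.foldl (planStep d) (pd.items, a)).1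
    ∧ (L.foldl payStep (pd, pk, a)).2.2 = (L.foldl (planStep d) (pd.items, a)).2 := by
  induction L generalizing pd pk a with
  | nil => exact ⟨rfl, rfl⟩
  | cons v L ih =>
    rw [List.nodup_cons] at hnd
    rw [List.foldl_cons, List.foldl_cons]
    by_cases hge : a ≥ v
    · have hpkv : pk.getD v 0 = d.getD v 0 := hpk v (List.mem_cons_self ..)
      have hstep : payStep (pd, pk, a) v
          = (pd.insert v (min (d.getD v 0) (PySem.Int.floordiv a v)),
             pk.insert v (pk.getD v 0 - min (d.getD v 0) (PySem.Int.floordiv a v)),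
             a - v * min (d.getD v 0) (PySem.Int.floordiv a v)) := by
        simp [payStep, hge, hpkv]
      have hstep' : planStep d (pd.items, a) v
          = (pd.items ++ [(v, min (d.getD v 0) (PySem.Int.floordiv a v))],
             a - v * min (d.getD v 0) (PySem.Int.floordiv a v)) := by
        simp [planStep, hge]
      rw [hstep, hstep']
      set n := min (d.getD v 0) (PySem.Int.floordiv a v) with hn
      have hitems : (pd.insert v n).items = pd.items ++ [(v, n)] :=
        PySem.Dict.items_insert_of_not_contains _ _ (hpd v (List.mem_cons_self ..))
      rw [← hitems]
      apply ih
      · exact hnd.2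
      · intro w hw
        have hwv : w ≠ v := fun hwv => hnd.1 (hwv ▸ hw)
        rw [PySem.Dict.getD_insert_of_ne _ _ _ hwv]
        exact hpk w (List.mem_cons_of_mem _ hw)
      · intro w hw
        have hwv : w ≠ v := fun hwv => hnd.1 (hwv ▸ hw)
        rw [PySem.Dict.contains_insert]
        simp [hwv, hpd w (List.mem_cons_of_mem _ hw)]
    · have hstep : payStep (pd, pk, a) v = (pd, pk, a) := by simp [payStep, hge]
      have hstep' : planStep d (pd.items, a) v = (pd.items, a) := by simp [planStep, hge]
      rw [hstep, hstep']
      exact ih pd pk a hnd.2 (fun w hw => hpk w (List.mem_cons_of_mem _ hw))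
        (fun w hw => hpd w (List.mem_cons_of_mem _ hw))

-- Unfolding lemmas for payPlan that avoid the dependent match.
lemma payPlan_none (d : PySem.Dict Int Int) (keys : List Int) (amt : Int)
    (plan : List (Int × Int)) (h : (keys.filter (fun k => k ≤ amt)).max? = none) :
    payPlan d keys amt plan = (plan, amt) := by
  rw [payPlan.eq_def, h]

lemma payPlan_some (d : PySem.Dict Int Int) (keys : List Int) (amt : Int)
    (plan : List (Int × Int)) (m : Int)
    (h : (keys.filter (fun k => k ≤ amt)).max? = some m) :
    payPlan d keys amt plan
      = payPlan d (keys.filter (fun k => k < m))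
          (amt - m * min (d.getD m 0) (PySem.Int.floordiv amt m))
          (plan ++ [(m, min (d.getD m 0) (PySem.Int.floordiv amt m))]) := by
  rw [payPlan.eq_def, h]

lemma foldl_max_eq (k : Int) (xs : List Int) (h : ∀ x ∈ xs, x ≤ k) :
    xs.foldl max k = k := by
  induction xs with
  | nil => rfl
  | cons x xs ih =>
    rw [List.foldl_cons, max_eq_left (h x (List.mem_cons_self ..))]
    exact ih (fun y hy => h y (List.mem_cons_of_mem _ hy))

-- The plain-plan fold over a strictly DESCENDING key list computes exactly B's
-- max-selection recursion.
lemma fold_eq_payPlan (d : PySem.Dict Int Int) (L : List Int)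
    (h : L.Pairwise (fun a b => b < a)) :
    ∀ (acc : List (Int × Int)) (a : Int),
      L.foldl (planStep d) (acc, a) = payPlan d L a acc := by
  induction L with
  | nil =>
    intro acc a
    rw [List.foldl_nil, payPlan_none]
    simp
  | cons k rest ih =>
    rw [List.pairwise_cons] at h
    intro acc a
    rw [List.foldl_cons]
    by_cases hka : k ≤ a
    · -- k fires and is the max eligible key; every remaining key is < k.
      have hmax : ((k :: rest).filter (fun x => x ≤ a)).max? = some k := by
        rw [List.filter_cons_of_pos (by simpa using hka), List.max?_cons']
        congr 1
        exact foldl_max_eq k _ (fun x hx =>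
          le_of_lt (h.1 x (List.mem_filter.mp hx).1))
      have hrest : rest.filter (fun x => x < k) = rest :=
        List.filter_eq_self.mpr (fun x hx => by simpa using h.1 x hx)
      have hfl : (k :: rest).filter (fun x => x < k) = rest := by
        rw [List.filter_cons_of_neg (by simp), hrest]
      rw [payPlan_some d _ _ _ k hmax, hfl]
      have hstep : planStep d (acc, a) k
          = (acc ++ [(k, min (d.getD k 0) (PySem.Int.floordiv a k))],
             a - k * min (d.getD k 0) (PySem.Int.floordiv a k)) := by
        simp [planStep, hka]
      rw [hstep]
      exact ih h.2 _ _
    · -- k is skipped by both sides.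
      have hstep : planStep d (acc, a) k = (acc, a) := by simp [planStep, hka]
      rw [hstep, ih h.2 acc a]
      have hf : (k :: rest).filter (fun x => x ≤ a) = rest.filter (fun x => x ≤ a) :=
        List.filter_cons_of_neg (by simpa using hka)
      cases hmax : (rest.filter (fun x => x ≤ a)).max? with
      | none =>
        rw [payPlan_none d rest a acc hmax, payPlan_none d (k :: rest) a acc (by rw [hf, hmax])]
      | some m =>
        have hm : m ∈ rest := (List.mem_filter.mp (List.max?_eq_some_iff.mp hmax).1).1
        have hkm : m < k := h.1 m hm
        have hfl : (k :: rest).filter (fun x => x < m) = rest.filter (fun x => x < m) :=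
          List.filter_cons_of_neg (by simp; omega)
        rw [payPlan_some d rest a acc m hmax,
            payPlan_some d (k :: rest) a acc m (by rw [hf, hmax]), hfl]

-- B's recursion depends on the candidate keys only as a set: permuting them changes nothing.
lemma payPlan_perm (d : PySem.Dict Int Int) :
    ∀ (N : ℕ) (L L' : List Int), L.length ≤ N → L.Perm L' →
      ∀ (amt : Int) (plan : List (Int × Int)),
        payPlan d L amt plan = payPlan d L' amt plan := by
  intro N
  induction N with
  | zero =>
    intro L L' hlen hp amt plan
    have : L = [] := List.eq_nil_of_length_eq_zero (Nat.le_zero.mp hlen)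
    subst this
    rw [hp.symm.eq_nil]
  | succ n ih =>
    intro L L' hlen hp amt plan
    have hpf : (L.filter (fun k => k ≤ amt)).Perm (L'.filter (fun k => k ≤ amt)) :=
      hp.filter _
    cases hmax : (L.filter (fun k => k ≤ amt)).max? with
    | none =>
      have hnil : L.filter (fun k => k ≤ amt) = [] := List.max?_eq_none_iff.mp hmax
      have hnil' : L'.filter (fun k => k ≤ amt) = [] := (hnil ▸ hpf).symm.eq_nil
      rw [payPlan_none d L amt plan hmax,
          payPlan_none d L' amt plan (by rw [hnil']; rfl)]
    | some m =>
      have hchar := List.max?_eq_some_iff.mp hmax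
      have hmax' : (L'.filter (fun k => k ≤ amt)).max? = some m := by
        apply List.max?_eq_some_iff.mpr
        exact ⟨hpf.mem_iff.mp hchar.1, fun b hb => hchar.2 b (hpf.mem_iff.mpr hb)⟩
      have hm : m ∈ L := (List.mem_filter.mp hchar.1).1
      have hlt : (L.filter (fun k => k < m)).length < L.length :=
        List.length_filter_lt_length_iff_exists.mpr ⟨m, hm, by simp⟩
      rw [payPlan_some d L amt plan m hmax, payPlan_some d L' amt plan m hmax']
      exact ih _ _ (by omega) (hp.filter _) _ _

-- ===== VERDICT (by name: the statement is the Claim_ definition above) =====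
theorem pay_spec : Claim_equal_pay := by
  intro pocket amt _hdom hpre
  obtain ⟨hnd, _⟩ := hpre
  unfold Spec_pay
  have hkeys : (PySem.Dict.mk pocket).keys = pocket.map Prod.fst := rfl
  show (if amt > payTotal (PySem.Dict.mk pocket) then []
    else
      let st := (PySem.List.sorted (PySem.Dict.mk pocket).keys (fun k => k) true).foldl payStep
        (PySem.Dict.empty, PySem.Dict.mk pocket, amt)
      if st.2.2 ≠ 0 then [] else st.1.items)
    = (if amt > ((PySem.Dict.mk pocket).items.map (fun p => p.1 * p.2)).sum then []
    else
      let st := payPlan (PySem.Dict.mk pocket) (PySem.Dict.mk pocket).keys amt []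
      if st.2 ≠ 0 then [] else st.1)
  have hitems : (PySem.Dict.mk pocket).items = pocket := rfl
  rw [payTotal_eq pocket hnd, hitems]
  by_cases hgt : amt > (pocket.map (fun p => p.1 * p.2)).sum
  · simp [hgt]
  · simp only [hgt, if_false]
    set S := PySem.List.sorted (PySem.Dict.mk pocket).keys (fun k => k) true with hS
    have hperm : S.Perm (PySem.Dict.mk pocket).keys := PySem.List.sorted_perm _ _ _
    have hsortnd : S.Nodup := hperm.nodup_iff.mpr (hkeys ▸ hnd)
    have hdesc : S.Pairwise (fun a b => b < a) := by
      have h1 : S.Pairwise (fun a b : Int => b ≤ a) := PySem.List.sorted_pairwise_rev _ _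
      have h2 : S.Pairwise (fun a b : Int => a ≠ b) := hsortnd
      exact (h1.and h2).imp (fun {a b} h => lt_of_le_of_ne h.1 (Ne.symm h.2))
    have hfold := loop_eq (PySem.Dict.mk pocket) S
      PySem.Dict.empty (PySem.Dict.mk pocket) amt hsortnd
      (fun v _ => rfl) (fun v _ => PySem.Dict.contains_empty v)
    have hemp : (PySem.Dict.empty : PySem.Dict Int Int).items = [] := rfl
    rw [hemp] at hfold
    have hplan : S.foldl (planStep (PySem.Dict.mk pocket)) ([], amt)
        = payPlan (PySem.Dict.mk pocket) (PySem.Dict.mk pocket).keys amt [] := by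
      rw [fold_eq_payPlan _ S hdesc [] amt]
      exact payPlan_perm _ S.length S _ le_rfl hperm amt []
    rw [hfold.1, hfold.2, hplan]
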